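-- pv_equiv track=rewrite | github.com/Simaregele/YAVision | parse_dialog.py | build_dialogue
-- ===== SOURCE A (Python) =====
-- def build_dialogue(data, groups):
--     """
--     Построение диалога с учетом группировки данных.
--
--     :param data: Исходные данные в формате (X, текст сообщения)
--     :param groups: Группы данных, возвращаемые функцией group_data_by_x
--     :return: Список сообщений с указанием отправителя
--     """
--     largest_group_index = max(range(len(groups)), key=lambda i: len(groups[i]))
--     group_sender_mapping = {i: "Отправитель 1" if i == largest_group_index else "Отправитель 2" for i in range(len(groups))}
--
--     rebuilt_dialogue = []
--     current_sender = None
--     current_message = ""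
--
--     for x, message in data:
--         # Преобразование message в строку на случай, если это не строка
--         message = str(message)
--
--         sender = next((group_sender_mapping[index] for index, group in enumerate(groups) if int(x) in [item[0] for item in group]), None)
--
--         if sender != current_sender:
--             if current_message:
--                 rebuilt_dialogue.append((current_sender, current_message.strip()))
--             current_sender = sender
--             current_message = message
--         else:
--             current_message += " " + message
--
--     if current_message:
--         rebuilt_dialogue.append((current_sender, current_message.strip()))
--
--     return rebuilt_dialogue
-- ===== SOURCE B (Python) =====
-- def build_dialogue(data, groups):
--     """Different decomposition: one sender dict built once from all groups
--     (setdefault = first group wins), then the runs are built BACK-TO-FRONT by a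
--     single reversed pass that prepends each message to the current front run or
--     opens a new one, and finally each run is joined/stripped/filtered."""
--     largest_group_index = max(range(len(groups)), key=lambda i: len(groups[i]))
--     sender_of = {}
--     for index, group in enumerate(groups):
--         label = "Отправитель 1" if index == largest_group_index else "Отправитель 2"
--         for item in group:
--             sender_of.setdefault(item[0], label)
--
--     runs = []
--     for x, message in reversed(data):
--         sender = sender_of.get(int(x))
--         if runs and runs[0][0] == sender:
--             runs[0] = (sender, [str(message)] + runs[0][1])
--         else:
--             runs.insert(0, (sender, [str(message)]))
--
--     result = []
--     for sender, messages in runs: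
--         joined = " ".join(messages)
--         if joined:
--             result.append((sender, joined.strip()))
--     return result
-- ===== Notes on version B (the rewrite author's own statement) =====
-- stated objective: alternative
-- what changed: B builds one x->sender dict up front via setdefault over all groups (so the per-row scan over every group's member list disappears), constructs the runs back-to-front in a single reversed pass that prepends to the front run, and finishes with a separate join/strip/filter pass, instead of A's forward current_sender/current_message string accumulator with a per-row group rescan.
-- intended difference: When the data starts with a single empty-message row whose x belongs to no group (followed by a matched row or nothing), A's current_message initialization makes it emit a spurious leading (None, '') entry, while B drops that empty run, which is the intended output. — e.g. on build_dialogue([(2, "")], [[(1, "x")]]): A returns [(none, "")], B returns []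
import Mathlib
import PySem

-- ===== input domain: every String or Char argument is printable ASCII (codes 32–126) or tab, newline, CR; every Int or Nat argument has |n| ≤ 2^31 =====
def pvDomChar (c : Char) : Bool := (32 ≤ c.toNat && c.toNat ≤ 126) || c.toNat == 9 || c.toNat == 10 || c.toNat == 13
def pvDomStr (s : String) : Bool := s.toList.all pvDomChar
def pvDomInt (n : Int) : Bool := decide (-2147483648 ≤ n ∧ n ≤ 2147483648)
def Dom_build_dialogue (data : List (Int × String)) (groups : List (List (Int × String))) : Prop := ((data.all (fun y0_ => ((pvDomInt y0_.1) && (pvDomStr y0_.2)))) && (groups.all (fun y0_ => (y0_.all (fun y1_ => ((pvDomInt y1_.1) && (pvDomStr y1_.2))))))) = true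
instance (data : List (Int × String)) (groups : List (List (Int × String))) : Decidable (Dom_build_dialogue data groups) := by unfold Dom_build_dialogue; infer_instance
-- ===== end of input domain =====

-- B replaces A's forward current_sender/current_message string accumulator (with a per-row
-- rescan of every group) by a sender dict built once with setdefault, a reversed pass that
-- builds the runs back-to-front, and a final join/strip/filter pass; equal outside D_ below.

-- ===== PORT A =====
-- A-side helper: the per-row sender lookup
-- 'next((group_sender_mapping[index] for index, group in enumerate(groups) if int(x) in [item[0] for item in group]), None)'.
-- mapping[index] is ported as getD with default "": exact, since every produced index is a key of the dict.
def pvSenderA (groups : List (List (Int × String))) (mapping : PySem.Dict Int String) (x : Int) : Option String :=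
  (List.find? (fun ig => (ig.2.map Prod.fst).contains x) (PySem.List.enumerate groups)).map
    (fun ig => mapping.getD ig.1 "")

def build_dialogue (data : List (Int × String)) (groups : List (List (Int × String))) : List (Option String × String) :=
  -- max(range(len(groups)), key=lambda i: len(groups[i])); groups[i] ported as (pyGet? …).getD []: exact, i ∈ range(len(groups)).
  match PySem.List.max? (PySem.List.pyRange 0 (groups.length : Int))
      (fun i => ((PySem.List.pyGet? groups i).getD []).length) with
  | none => []  -- unreachable under Pre_: Python raises ValueError on groups = []
  | some largest_group_index =>
    let group_sender_mapping : PySem.Dict Int String :=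
      (PySem.List.pyRange 0 (groups.length : Int)).foldl
        (fun d i => d.insert i (if i = largest_group_index then "Отправитель 1" else "Отправитель 2"))
        (⟨[]⟩ : PySem.Dict Int String)
    let st := data.foldl
      (fun (st : List (Option String × String) × Option String × String) row =>
        let sender := pvSenderA groups group_sender_mapping row.1
        if sender ≠ st.2.1 then
          ((if st.2.2 ≠ "" then st.1 ++ [(st.2.1, PySem.Str.strip st.2.2)] else st.1), sender, row.2)
        else
          (st.1, st.2.1, st.2.2 ++ " " ++ row.2))
      ([], none, "")
    if st.2.2 ≠ "" then st.1 ++ [(st.2.1, PySem.Str.strip st.2.2)] else st.1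

-- ===== PORT B =====
-- B-side helper: the sender dict, built once: 'for index, group in enumerate(groups): … for item in group: sender_of.setdefault(item[0], label)'.
def pvSenderDict (groups : List (List (Int × String))) (largest : Int) : PySem.Dict Int String :=
  (PySem.List.enumerate groups).foldl
    (fun d ig =>
      let label := if ig.1 = largest then "Отправитель 1" else "Отправитель 2"
      ig.2.foldl (fun d item => d.setdefault item.1 label) d)
    (⟨[]⟩ : PySem.Dict Int String)

-- B-side helper: 'for x, message in reversed(data): … runs.insert(0, …) / runs[0] = …' — the
-- reversed loop that prepends to the front run is a foldr over data.
def pvBuildRuns (sender_of : PySem.Dict Int String) (data : List (Int × String)) :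
    List (Option String × List String) :=
  data.foldr
    (fun r runs =>
      let sender := sender_of.get? r.1
      match runs with
      | (s, ms) :: rest => if s = sender then (sender, r.2 :: ms) :: rest else (sender, [r.2]) :: (s, ms) :: rest
      | [] => [(sender, [r.2])])
    []

def build_dialogue_alt (data : List (Int × String)) (groups : List (List (Int × String))) : List (Option String × String) :=
  match PySem.List.max? (PySem.List.pyRange 0 (groups.length : Int))
      (fun i => ((PySem.List.pyGet? groups i).getD []).length) with
  | none => []  -- unreachable under Pre_
  | some largest_group_index =>
    let runs := pvBuildRuns (pvSenderDict groups largest_group_index) data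
    runs.foldl
      (fun result sr =>
        let joined := PySem.Str.join " " sr.2
        if joined ≠ "" then result ++ [(sr.1, PySem.Str.strip joined)] else result)
      []

-- ===== PRECONDITION & SPEC =====
-- Pre_ excludes only groups = [], where Python A raises ValueError (max() of an empty range).
def Pre_build_dialogue (data : List (Int × String)) (groups : List (List (Int × String))) : Prop :=
  groups ≠ []
instance (data : List (Int × String)) (groups : List (List (Int × String))) : Decidable (Pre_build_dialogue data groups) := by unfold Pre_build_dialogue; infer_instance

def pvWitness_build_dialogue : (List (Int × String)) × (List (List (Int × String))) :=
  ([(1, "hi")], [[(1, "a")]])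

-- When the data starts with a single empty-message row whose x belongs to no group (followed by a
-- matched row or nothing), A's current_message initialization makes it emit a spurious leading
-- (None, '') entry, while B drops that empty run, which is the intended output.
def D_build_dialogue (data : List (Int × String)) (groups : List (List (Int × String))) : Prop :=
  (data.take 1).map Prod.snd = [""] ∧
  (∀ x ∈ (data.take 1).map Prod.fst, ∀ g ∈ groups, x ∉ g.map Prod.fst) ∧
  (∀ x2 ∈ ((data.drop 1).take 1).map Prod.fst, ∃ g ∈ groups, x2 ∈ g.map Prod.fst)
instance (data : List (Int × String)) (groups : List (List (Int × String))) : Decidable (D_build_dialogue data groups) := by unfold D_build_dialogue; infer_instance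

def Spec_build_dialogue (data : List (Int × String)) (groups : List (List (Int × String))) (out : List (Option String × String)) : Prop := ¬ D_build_dialogue data groups → out = build_dialogue_alt data groups
instance (data : List (Int × String)) (groups : List (List (Int × String))) (out : List (Option String × String)) : Decidable (Spec_build_dialogue data groups out) := by unfold Spec_build_dialogue; infer_instance

def pvDiffWitness_build_dialogue : (List (Int × String)) × (List (List (Int × String))) :=
  ([(2, "")], [[(1, "x")]])
def pvDiffWitnessOut_build_dialogue : (List (Option String × String)) × (List (Option String × String)) :=
  ([(none, "")], [])

-- ===== CLAIM (what is proved, stated in full; the proofs are below) =====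
def Claim_unchanged_build_dialogue : Prop := ∀ (data : List (Int × String)) (groups : List (List (Int × String))), Dom_build_dialogue data groups → Pre_build_dialogue data groups → Spec_build_dialogue data groups (build_dialogue data groups)
def Claim_changed_build_dialogue : Prop := Dom_build_dialogue (pvDiffWitness_build_dialogue.1) (pvDiffWitness_build_dialogue.2) ∧ Pre_build_dialogue (pvDiffWitness_build_dialogue.1) (pvDiffWitness_build_dialogue.2) ∧ D_build_dialogue (pvDiffWitness_build_dialogue.1) (pvDiffWitness_build_dialogue.2) ∧ build_dialogue (pvDiffWitness_build_dialogue.1) (pvDiffWitness_build_dialogue.2) = pvDiffWitnessOut_build_dialogue.1 ∧ build_dialogue_alt (pvDiffWitness_build_dialogue.1) (pvDiffWitness_build_dialogue.2) = pvDiffWitnessOut_build_dialogue.2 ∧ pvDiffWitnessOut_build_dialogue.1 ≠ pvDiffWitnessOut_build_dialogue.2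
def Claim_exact_build_dialogue : Prop := ∀ (data : List (Int × String)) (groups : List (List (Int × String))), Dom_build_dialogue data groups → Pre_build_dialogue data groups → D_build_dialogue data groups → build_dialogue data groups ≠ build_dialogue_alt data groups

-- ===== LEMMAS AND PROOFS =====

-- the canonical sender lookup both ports are reduced to
def pvSend (groups : List (List (Int × String))) (largest : Int) (x : Int) : Option String :=
  (List.find? (fun ig => (ig.2.map Prod.fst).contains x) (PySem.List.enumerate groups)).map
    (fun ig => if ig.1 = largest then "Отправитель 1" else "Отправитель 2")

-- A's loop step, on precomputed (sender, message) pairs.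
def pvStep (st : List (Option String × String) × Option String × String)
    (p : Option String × String) : List (Option String × String) × Option String × String :=
  if p.1 ≠ st.2.1 then
    ((if st.2.2 ≠ "" then st.1 ++ [(st.2.1, PySem.Str.strip st.2.2)] else st.1), p.1, p.2)
  else
    (st.1, st.2.1, st.2.2 ++ " " ++ p.2)

def pvFinish (st : List (Option String × String) × Option String × String) :
    List (Option String × String) :=
  if st.2.2 ≠ "" then st.1 ++ [(st.2.1, PySem.Str.strip st.2.2)] else st.1

def pvFlush (cur : Option String) (msg : String) : List (Option String × String) :=
  if msg ≠ "" then [(cur, PySem.Str.strip msg)] else []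

-- the run decomposition both programs are reduced to (fuel = list length, only for termination)
def pvEmitRuns : Nat → List (Option String × String) → List (Option String × String)
  | _, [] => []
  | 0, _ :: _ => []
  | fuel + 1, (s, m) :: rest =>
    pvFlush s (PySem.Str.join " " (m :: (rest.takeWhile (fun p => p.1 == s)).map Prod.snd)) ++
      pvEmitRuns fuel (rest.dropWhile (fun p => p.1 == s))

def pvRuns (l : List (Option String × String)) : List (Option String × String) :=
  pvEmitRuns l.length l

-- B's run-building step on precomputed pairs, and its finishing pass.
def pvRunsOf (l : List (Option String × String)) : List (Option String × List String) :=
  l.foldr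
    (fun p runs =>
      match runs with
      | (s, ms) :: rest => if s = p.1 then (p.1, p.2 :: ms) :: rest else (p.1, [p.2]) :: (s, ms) :: rest
      | [] => [(p.1, [p.2])])
    []

def pvFinal (runs : List (Option String × List String)) : List (Option String × String) :=
  runs.flatMap (fun sr => pvFlush sr.1 (PySem.Str.join " " sr.2))

-- ---- string facts ----

lemma pv_space_append_ne (s : String) : (" " ++ s) ≠ "" := by
  intro h
  have h' := congrArg String.toList h
  simp [String.toList_append] at h'

lemma pv_strip_space (s : String) : PySem.Str.strip (" " ++ s) = PySem.Str.strip s := by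
  apply String.ext
  have h1 := PySem.Str.toList_strip (" " ++ s)
  have h2 := PySem.Str.toList_strip s
  have hts : (" " ++ s).toList = ' ' :: s.toList := by simp [String.toList_append]
  rw [hts] at h1
  have hs : PySem.Chars.strip (' ' :: s.toList) = PySem.Chars.strip s.toList := by
    simp [PySem.Chars.strip, PySem.Chars.lstrip, PySem.Chars.isspace]
  rw [h1, h2, hs]

lemma pv_empty_append (s : String) : "" ++ s = s := by
  apply String.ext
  simp [String.toList_append]

lemma pv_join_singleton (m : String) : PySem.Str.join " " [m] = m := by
  apply String.ext
  rw [PySem.Str.toList_join]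
  simp [PySem.Chars.join, List.intercalate]

lemma pv_join_two_ne (a b : String) (t : List String) :
    PySem.Str.join " " (a :: b :: t) ≠ "" := by
  intro h
  have h' := congrArg String.toList h
  rw [PySem.Str.toList_join] at h'
  simp [PySem.Chars.join, List.intercalate, List.intersperse] at h'

lemma pv_joinSp (ms : List String) (m0 : String) :
    ms.foldl (fun a m => a ++ " " ++ m) m0 = PySem.Str.join " " (m0 :: ms) := by
  induction ms generalizing m0 with
  | nil => exact (pv_join_singleton m0).symm
  | cons m1 t ih =>
    rw [List.foldl_cons, ih (m0 ++ " " ++ m1)]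
    apply String.ext
    rw [PySem.Str.toList_join, PySem.Str.toList_join]
    simp only [List.map_cons, String.toList_append]
    cases t with
    | nil => simp [PySem.Chars.join, List.intercalate, List.intersperse, List.append_assoc]
    | cons t1 t2 =>
      simp [PySem.Chars.join, List.intercalate, List.intersperse, List.append_assoc]

lemma pv_foldl_space (ms : List String) (a : String) :
    ms.foldl (fun a m => a ++ " " ++ m) (" " ++ a)
      = " " ++ ms.foldl (fun a m => a ++ " " ++ m) a := by
  induction ms generalizing a with
  | nil => rfl
  | cons m t ih =>
    simp only [List.foldl_cons]
    rw [show (" " ++ a ++ " " ++ m : String) = " " ++ (a ++ " " ++ m) from by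
      apply String.ext; simp [String.toList_append]]
    exact ih (a ++ " " ++ m)

-- ---- A's dict comprehension ----

lemma pv_getD_preserve (l : List Int) (f : Int → String) (d : PySem.Dict Int String)
    (i : Int) (hi : i ∉ l) :
    (l.foldl (fun d j => d.insert j (f j)) d).getD i "" = d.getD i "" := by
  induction l generalizing d with
  | nil => rfl
  | cons j t ih =>
    simp only [List.foldl_cons]
    rw [ih _ (fun h => hi (List.mem_cons_of_mem _ h)), PySem.Dict.getD_insert]
    have : i ≠ j := fun h => hi (h ▸ List.mem_cons_self)
    simp [this]

lemma pv_getD_foldl_insert (l : List Int) (f : Int → String) (hl : l.Nodup) (i : Int)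
    (hi : i ∈ l) (d : PySem.Dict Int String) :
    (l.foldl (fun d j => d.insert j (f j)) d).getD i "" = f i := by
  induction l generalizing d with
  | nil => simp at hi
  | cons j t ih =>
    simp only [List.foldl_cons]
    rcases List.mem_cons.mp hi with h | h
    · subst h
      have hnot : i ∉ t := (List.nodup_cons.mp hl).1
      rw [pv_getD_preserve t f _ i hnot, PySem.Dict.getD_insert]
      simp
    · exact ih (List.nodup_cons.mp hl).2 h _

-- ---- enumerate ----

lemma pv_enumerate_mem_bounds {α : Type} (l : List α) (s : Int) (p : Int × α)
    (hp : p ∈ PySem.List.enumerate l s) : s ≤ p.1 ∧ p.1 < s + l.length := by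
  induction l generalizing s with
  | nil => simp [PySem.List.enumerate] at hp
  | cons x t ih =>
    simp only [PySem.List.enumerate, List.mem_cons] at hp
    rcases hp with h | h
    · subst h
      constructor
      · exact le_refl s
      · show s < s + ((x :: t).length : Int)
        push_cast [List.length_cons]
        omega
    · have hih := ih (s + 1) h
      push_cast [List.length_cons] at hih ⊢
      omega

lemma pv_enumerate_snd_mem {α : Type} (l : List α) (s : Int) (p : Int × α)
    (hp : p ∈ PySem.List.enumerate l s) : p.2 ∈ l := by
  induction l generalizing s with
  | nil => simp [PySem.List.enumerate] at hp
  | cons x t ih =>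
    simp only [PySem.List.enumerate, List.mem_cons] at hp
    rcases hp with h | h
    · subst h; simp
    · exact List.mem_cons_of_mem _ (ih (s + 1) h)

lemma pv_mem_enumerate_of_mem {α : Type} (l : List α) (g : α) (hg : g ∈ l) (s : Int) :
    ∃ i, (i, g) ∈ PySem.List.enumerate l s := by
  induction l generalizing s with
  | nil => simp at hg
  | cons x t ih =>
    rcases List.mem_cons.mp hg with h | h
    · exact ⟨s, by subst h; simp [PySem.List.enumerate]⟩
    · obtain ⟨i, hi⟩ := ih h (s + 1)
      exact ⟨i, by simp [PySem.List.enumerate, hi]⟩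

-- ---- A's sender lookup = pvSend ----

lemma pv_senderA_eq (groups : List (List (Int × String))) (largest : Int) (x : Int) :
    pvSenderA groups
      ((PySem.List.pyRange 0 (groups.length : Int)).foldl
        (fun d i => d.insert i (if i = largest then "Отправитель 1" else "Отправитель 2"))
        (⟨[]⟩ : PySem.Dict Int String)) x
    = pvSend groups largest x := by
  unfold pvSenderA pvSend
  cases hfind : List.find? (fun ig => (ig.2.map Prod.fst).contains x)
      (PySem.List.enumerate groups) with
  | none => rfl
  | some ig =>
    simp only [Option.map_some]
    congr 1
    have hmem := List.mem_of_find?_eq_some hfind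
    have hb := pv_enumerate_mem_bounds groups 0 ig hmem
    have hrange : ig.1 ∈ PySem.List.pyRange 0 (groups.length : Int) := by
      rw [PySem.List.mem_pyRange_one]; omega
    exact pv_getD_foldl_insert _ _ (PySem.List.nodup_pyRange_one _ _) _ hrange _

-- ---- B's setdefault dict = pvSend ----

lemma pv_get?_setdefault (d : PySem.Dict Int String) (k : Int) (v : String) (x : Int) :
    (d.setdefault k v).get? x
      = if d.contains k = true then d.get? x else (d.insert k v).get? x := by
  by_cases h : d.contains k = true
  · simp [PySem.Dict.setdefault, h]
  · have h' : d.contains k = false := by simp at h; exact h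
    rw [PySem.Dict.setdefault]
    simp only [h', Bool.false_eq_true, if_false]
    congr 1
    apply PySem.Dict.ext
    rw [PySem.Dict.items_insert_of_not_contains d v h']

lemma pv_group_fold (g : List (Int × String)) (lab : String) (d : PySem.Dict Int String)
    (x : Int) :
    (g.foldl (fun d item => d.setdefault item.1 lab) d).get? x
      = (d.get? x).or (if (g.map Prod.fst).contains x then some lab else none) := by
  induction g generalizing d with
  | nil => simp
  | cons item t ih =>
    simp only [List.foldl_cons]
    rw [ih, pv_get?_setdefault]
    rcases eq_or_ne x item.1 with hx | hx
    · have hcm : ((List.map Prod.fst (item :: t)).contains x) = true := by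
        simp [List.contains_eq_mem, hx]
      by_cases hk : d.contains item.1 = true
      · have hsome : (d.get? x).isSome = true := by
          rw [hx, ← PySem.Dict.contains_eq_isSome_get?]; exact hk
        obtain ⟨w, hw⟩ := Option.isSome_iff_exists.mp hsome
        simp [hk, hw, hcm]
      · have hk' : d.contains item.1 = false := by simpa using hk
        have hdn : d.get? item.1 = none :=
          (PySem.Dict.get?_eq_none_iff_contains d item.1).mpr hk'
        rw [if_neg hk, PySem.Dict.get?_insert]
        simp [hx, hdn, hcm]
    · have hif : (if (List.map Prod.fst (item :: t)).contains x = true then some lab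
            else (none : Option String))
          = (if (List.map Prod.fst t).contains x = true then some lab else none) :=
        if_congr (by simp [List.contains_eq_mem, List.mem_cons, hx]) rfl rfl
      by_cases hk : d.contains item.1 = true
      · rw [if_pos hk, hif]
      · rw [if_neg hk, PySem.Dict.get?_insert, if_neg hx, hif]

lemma pv_dict_loop (largest : Int) (l : List (List (Int × String))) :
    ∀ (s : Int) (d : PySem.Dict Int String) (x : Int),
    ((PySem.List.enumerate l s).foldl
        (fun d ig =>
          let label := if ig.1 = largest then "Отправитель 1" else "Отправитель 2"
          ig.2.foldl (fun d item => d.setdefault item.1 label) d) d).get? x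
      = (d.get? x).or
          ((List.find? (fun ig => (ig.2.map Prod.fst).contains x)
              (PySem.List.enumerate l s)).map
            (fun ig => if ig.1 = largest then "Отправитель 1" else "Отправитель 2")) := by
  induction l with
  | nil => intro s d x; simp [PySem.List.enumerate]
  | cons g t ih =>
    intro s d x
    simp only [PySem.List.enumerate, List.foldl_cons, List.find?_cons]
    rw [ih, pv_group_fold]
    by_cases hm : x ∈ List.map Prod.fst g
    · simp [List.contains_eq_mem, hm, Option.or_assoc]
    · simp [List.contains_eq_mem, hm]

lemma pv_senderDict_get (groups : List (List (Int × String))) (largest : Int) (x : Int) :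
    (pvSenderDict groups largest).get? x = pvSend groups largest x := by
  unfold pvSenderDict pvSend
  rw [pv_dict_loop]
  have : (⟨[]⟩ : PySem.Dict Int String).get? x = none := rfl
  rw [this, Option.none_or]

-- pvSend is none exactly when x is in no group
lemma pv_send_none_iff (groups : List (List (Int × String))) (largest : Int) (x : Int) :
    pvSend groups largest x = none ↔ ∀ g ∈ groups, x ∉ g.map Prod.fst := by
  unfold pvSend
  rw [Option.map_eq_none_iff, List.find?_eq_none]
  constructor
  · intro h g hg hx
    obtain ⟨i, hi⟩ := pv_mem_enumerate_of_mem groups g hg 0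
    have h2 := h _ hi
    simp only [List.contains_eq_mem, decide_eq_true_eq] at h2
    exact h2 hx
  · intro h p hp
    simp only [List.contains_eq_mem, decide_eq_true_eq]
    exact h _ (pv_enumerate_snd_mem groups 0 p hp)

-- ---- B's run building and finishing, reduced to pvRuns ----

lemma pv_fuel_irrel : ∀ (f1 : Nat) (l : List (Option String × String)) (f2 : Nat),
    l.length ≤ f1 → l.length ≤ f2 → pvEmitRuns f1 l = pvEmitRuns f2 l := by
  intro f1
  induction f1 with
  | zero =>
    intro l f2 h1 _
    have : l = [] := by cases l with | nil => rfl | cons a b => simp at h1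
    subst this
    cases f2 <;> rfl
  | succ n ih =>
    intro l f2 h1 h2
    cases l with
    | nil => cases f2 <;> rfl
    | cons p rest =>
      obtain ⟨s, m⟩ := p
      cases f2 with
      | zero => simp at h2
      | succ n2 =>
        simp only [pvEmitRuns]
        congr 1
        have hd := (List.dropWhile_sublist (p := fun p => p.1 == s) (l := rest)).length_le
        simp only [List.length_cons] at h1 h2
        exact ih _ _ (by omega) (by omega)

lemma pvRuns_cons (s : Option String) (m : String) (rest : List (Option String × String)) :
    pvRuns ((s, m) :: rest)
      = pvFlush s (PySem.Str.join " " (m :: (rest.takeWhile (fun p => p.1 == s)).map Prod.snd))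
        ++ pvRuns (rest.dropWhile (fun p => p.1 == s)) := by
  unfold pvRuns
  simp only [List.length_cons, pvEmitRuns]
  have hd := (List.dropWhile_sublist (p := fun p => p.1 == s) (l := rest)).length_le
  rw [pv_fuel_irrel rest.length _ _ hd (Nat.le_refl _)]

lemma pv_runsOf_cons (s : Option String) (m : String) (rest : List (Option String × String)) :
    pvRunsOf ((s, m) :: rest)
      = (s, m :: (rest.takeWhile (fun p => p.1 == s)).map Prod.snd)
          :: pvRunsOf (rest.dropWhile (fun p => p.1 == s)) := by
  induction rest generalizing s m with
  | nil => rfl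
  | cons q t ih =>
    obtain ⟨sq, mq⟩ := q
    by_cases h : sq = s
    · subst h
      have hstep : pvRunsOf ((sq, m) :: (sq, mq) :: t)
          = (match pvRunsOf ((sq, mq) :: t) with
             | (s', ms) :: rest' => if s' = sq then (sq, m :: ms) :: rest'
                 else (sq, [m]) :: (s', ms) :: rest'
             | [] => [(sq, [m])]) := rfl
      rw [hstep, ih]
      simp [List.takeWhile_cons, List.dropWhile_cons]
    · have hstep : pvRunsOf ((s, m) :: (sq, mq) :: t)
          = (match pvRunsOf ((sq, mq) :: t) with
             | (s', ms) :: rest' => if s' = s then (s, m :: ms) :: rest'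
                 else (s, [m]) :: (s', ms) :: rest'
             | [] => [(s, [m])]) := rfl
      rw [hstep, ih]
      have hb : (((sq, mq) : Option String × String).1 == s) = false := by simp [h]
      simp only [List.takeWhile_cons, List.dropWhile_cons, hb, Bool.false_eq_true, if_false,
        cond_false, List.map_nil]
      simp [h, ← ih]

lemma pv_final_runsOf : ∀ (n : Nat) (l : List (Option String × String)), l.length ≤ n →
    pvFinal (pvRunsOf l) = pvEmitRuns n l := by
  intro n
  induction n with
  | zero =>
    intro l h
    have : l = [] := by cases l with | nil => rfl | cons a b => simp at h
    subst this; rfl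
  | succ k ih =>
    intro l h
    cases l with
    | nil => rfl
    | cons p rest =>
      obtain ⟨s, m⟩ := p
      rw [pv_runsOf_cons]
      simp only [pvEmitRuns, pvFinal, List.flatMap_cons]
      congr 1
      have hd := (List.dropWhile_sublist (p := fun p => p.1 == s) (l := rest)).length_le
      simp only [List.length_cons] at h
      exact ih _ (by omega)

-- ---- A's accumulator pass = flush of the current run + pvRuns of the rest ----

lemma pv_finish_triple (acc : List (Option String × String)) (cur : Option String) (msg : String) :
    pvFinish (acc, cur, msg) = acc ++ pvFlush cur msg := by
  by_cases h : msg = "" <;> simp [pvFinish, pvFlush, h]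

lemma pv_loopA (pairs : List (Option String × String)) (acc : List (Option String × String))
    (cur : Option String) (msg : String) :
    pvFinish (pairs.foldl pvStep (acc, cur, msg)) =
      acc ++ pvFlush cur
          (((pairs.takeWhile (fun p => p.1 == cur)).map Prod.snd).foldl
            (fun a m => a ++ " " ++ m) msg)
        ++ pvRuns (pairs.dropWhile (fun p => p.1 == cur)) := by
  induction pairs generalizing acc cur msg with
  | nil => simp [pvRuns, pvEmitRuns, pv_finish_triple]
  | cons p t ih =>
    obtain ⟨s, m⟩ := p
    by_cases hs : s = cur
    · subst hs
      have hstep : pvStep (acc, s, msg) (s, m) = (acc, s, msg ++ " " ++ m) := by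
        simp [pvStep]
      rw [List.foldl_cons, hstep, ih]
      simp [List.takeWhile_cons, List.dropWhile_cons]
    · have hstep : pvStep (acc, cur, msg) (s, m) = (acc ++ pvFlush cur msg, s, m) := by
        by_cases hm : msg = "" <;> simp [pvStep, pvFlush, hs, hm]
      rw [List.foldl_cons, hstep, ih]
      have hb : ((s, m).1 == cur) = false := by simp [hs]
      rw [List.takeWhile_cons, List.dropWhile_cons]
      simp only [hb, Bool.false_eq_true, if_false, cond_false, List.map_nil, List.foldl_nil]
      rw [pvRuns_cons, pv_joinSp, List.append_assoc]

-- ---- the (sender, message) pairs, and the two programs expressed over them ----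

def pvPairs (groups : List (List (Int × String))) (largest : Int) (data : List (Int × String)) :
    List (Option String × String) :=
  data.map (fun r => (pvSend groups largest r.1, r.2))

lemma pv_Aeq (data : List (Int × String)) (groups : List (List (Int × String))) (largest : Int)
    (hmax : PySem.List.max? (PySem.List.pyRange 0 (groups.length : Int))
      (fun i => ((PySem.List.pyGet? groups i).getD []).length) = some largest) :
    build_dialogue data groups
      = pvFinish ((pvPairs groups largest data).foldl pvStep ([], none, "")) := by
  have hfun : (fun (st : List (Option String × String) × Option String × String)
      (row : Int × String) =>
      let sender := pvSenderA groups
        ((PySem.List.pyRange 0 (groups.length : Int)).foldl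
          (fun d i => d.insert i (if i = largest then "Отправитель 1" else "Отправитель 2"))
          (⟨[]⟩ : PySem.Dict Int String)) row.1
      if sender ≠ st.2.1 then
        ((if st.2.2 ≠ "" then st.1 ++ [(st.2.1, PySem.Str.strip st.2.2)] else st.1), sender, row.2)
      else (st.1, st.2.1, st.2.2 ++ " " ++ row.2))
      = (fun st row => pvStep st (pvSend groups largest row.1, row.2)) := by
    funext st row
    simp only [pv_senderA_eq]
    rfl
  unfold build_dialogue
  rw [hmax]
  unfold pvPairs
  rw [List.foldl_map]
  exact congrArg
    (fun f => pvFinish (List.foldl f ([], (none : Option String), ("" : String)) data)) hfun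

lemma pv_Beq (data : List (Int × String)) (groups : List (List (Int × String))) (largest : Int)
    (hmax : PySem.List.max? (PySem.List.pyRange 0 (groups.length : Int))
      (fun i => ((PySem.List.pyGet? groups i).getD []).length) = some largest) :
    build_dialogue_alt data groups = pvRuns (pvPairs groups largest data) := by
  unfold build_dialogue_alt
  rw [hmax]
  show (pvBuildRuns (pvSenderDict groups largest) data).foldl
      (fun result sr =>
        let joined := PySem.Str.join " " sr.2
        if joined ≠ "" then result ++ [(sr.1, PySem.Str.strip joined)] else result) []
    = pvRuns (pvPairs groups largest data)
  have hbuild : pvBuildRuns (pvSenderDict groups largest) data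
      = pvRunsOf (pvPairs groups largest data) := by
    induction data with
    | nil => rfl
    | cons r t ih =>
      show (fun r runs =>
          let sender := (pvSenderDict groups largest).get? r.1
          match runs with
          | (s, ms) :: rest => if s = sender then (sender, r.2 :: ms) :: rest
              else (sender, [r.2]) :: (s, ms) :: rest
          | [] => [(sender, [r.2])]) r (pvBuildRuns (pvSenderDict groups largest) t)
        = pvRunsOf (pvPairs groups largest (r :: t))
      rw [ih]
      simp only [pv_senderDict_get]
      rfl
  rw [hbuild]
  have hfinal : (pvRunsOf (pvPairs groups largest data)).foldl
      (fun result sr =>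
        let joined := PySem.Str.join " " sr.2
        if joined ≠ "" then result ++ [(sr.1, PySem.Str.strip joined)] else result) []
      = pvFinal (pvRunsOf (pvPairs groups largest data)) := by
    unfold pvFinal
    rw [show (fun (result : List (Option String × String)) (sr : Option String × List String) =>
        let joined := PySem.Str.join " " sr.2
        if joined ≠ "" then result ++ [(sr.1, PySem.Str.strip joined)] else result)
      = (fun result sr => result ++ pvFlush sr.1 (PySem.Str.join " " sr.2)) from by
        funext result sr
        by_cases h : PySem.Str.join " " sr.2 = "" <;> simp [pvFlush, h]]
    rw [PySem.List.foldl_append_eq_flatMap]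
    simp
  rw [hfinal]
  exact pv_final_runsOf _ _ (Nat.le_refl _)

-- ---- the top-level shape of A's result over the pairs ----

lemma pv_top (pairs : List (Option String × String))
    (h : ¬ ∃ t, pairs = ((none : Option String), "") :: t ∧
        t.takeWhile (fun p => p.1 == (none : Option String)) = []) :
    pvFinish (pairs.foldl pvStep ([], none, "")) = pvRuns pairs := by
  rw [pv_loopA]
  cases pairs with
  | nil => simp [pvRuns, pvEmitRuns, pvFinish, pvFlush]
  | cons p t =>
    obtain ⟨s0, m0⟩ := p
    cases s0 with
    | some s =>
      rw [List.takeWhile_cons, List.dropWhile_cons]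
      have hb : (((some s : Option String), m0).1 == (none : Option String)) = false := by simp
      simp only [hb, Bool.false_eq_true, if_false, List.map_nil, List.foldl_nil]
      simp [pvFlush]
    | none =>
      rw [List.takeWhile_cons, List.dropWhile_cons]
      have hb : (((none : Option String), m0).1 == (none : Option String)) = true := by simp
      simp only [hb, if_true, List.map_cons, List.foldl_cons]
      rw [pvRuns_cons]
      rw [show ("" ++ " " ++ m0 : String) = " " ++ m0 from by rw [pv_empty_append]]
      rw [pv_foldl_space, pv_joinSp]
      rw [show pvFlush none (" " ++ PySem.Str.join " "
            (m0 :: (t.takeWhile (fun p => p.1 == (none : Option String))).map Prod.snd))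
          = [((none : Option String), PySem.Str.strip (PySem.Str.join " "
              (m0 :: (t.takeWhile (fun p => p.1 == (none : Option String))).map Prod.snd)))]
        from by simp [pvFlush, pv_space_append_ne, pv_strip_space]]
      cases hmsc : (t.takeWhile (fun p => p.1 == (none : Option String))).map Prod.snd with
      | cons b tb =>
        have hne : PySem.Str.join " " (m0 :: b :: tb) ≠ "" := pv_join_two_ne m0 b tb
        simp [pvFlush, hne]
      | nil =>
        by_cases hm0 : m0 = ""
        · exact absurd ⟨t, by rw [hm0], List.map_eq_nil_iff.mp hmsc⟩ h
        · rw [pv_join_singleton]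
          simp [pvFlush, hm0]

lemma pv_top_corner (t : List (Option String × String))
    (htw : t.takeWhile (fun p => p.1 == (none : Option String)) = []) :
    pvFinish ((((none : Option String), ("" : String)) :: t).foldl pvStep ([], none, "")) =
      ((none : Option String), ("" : String)) :: pvRuns (((none : Option String), ("" : String)) :: t) := by
  rw [pv_loopA, pvRuns_cons]
  rw [List.takeWhile_cons, List.dropWhile_cons]
  have hb : (((none : Option String), ("" : String)).1 == (none : Option String)) = true := by simp
  simp only [hb, if_true, List.map_cons, List.foldl_cons, htw, List.map_nil, List.foldl_nil]
  rw [pv_join_singleton]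
  rw [show ("" ++ " " ++ "" : String) = " " from by apply String.ext; simp [String.toList_append]]
  rw [show pvFlush none (" " : String) = [((none : Option String), ("" : String))] from by decide]
  simp [pvFlush]

-- ---- the corner of the pairs is exactly D_ on the raw input ----

lemma pv_corner_iff (data : List (Int × String)) (groups : List (List (Int × String)))
    (largest : Int) :
    (∃ t, pvPairs groups largest data = ((none : Option String), "") :: t ∧
        t.takeWhile (fun p => p.1 == (none : Option String)) = [])
      ↔ D_build_dialogue data groups := by
  unfold pvPairs D_build_dialogue
  cases data with
  | nil => simp
  | cons r0 d' =>
    simp only [List.map_cons]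
    constructor
    · rintro ⟨t, hc, htw⟩
      injection hc with hh ht
      have h1 : pvSend groups largest r0.1 = none := congrArg Prod.fst hh
      have h2 : r0.2 = "" := congrArg Prod.snd hh
      rw [← ht] at htw
      refine ⟨by simp [h2], ?_, ?_⟩
      · intro x hx g hg
        simp at hx
        rw [hx]
        exact (pv_send_none_iff groups largest r0.1).mp h1 g hg
      · intro x2 hx2
        cases d' with
        | nil => simp at hx2
        | cons r1 d'' =>
          simp at hx2
          simp only [List.map_cons, List.takeWhile_cons] at htw
          by_cases hs1 : pvSend groups largest r1.1 = none
          · rw [hs1] at htw; simp at htw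
          · have hne := (pv_send_none_iff groups largest r1.1).not.mp hs1
            push_neg at hne
            obtain ⟨g, hg, hxg⟩ := hne
            exact ⟨g, hg, hx2 ▸ hxg⟩
    · rintro ⟨h1, h2, h3⟩
      have hr02 : r0.2 = "" := by simpa using h1
      have hsn : pvSend groups largest r0.1 = none := by
        apply (pv_send_none_iff groups largest r0.1).mpr
        intro g hg
        exact h2 r0.1 (by simp) g hg
      refine ⟨d'.map (fun r => (pvSend groups largest r.1, r.2)), by rw [hsn, hr02], ?_⟩
      cases d' with
      | nil => simp
      | cons r1 d'' =>
        have hx : ∃ g ∈ groups, r1.1 ∈ g.map Prod.fst := h3 r1.1 (by simp)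
        have hs1 : pvSend groups largest r1.1 ≠ none := by
          intro hn
          obtain ⟨g, hg, hxg⟩ := hx
          exact (pv_send_none_iff groups largest r1.1).mp hn g hg hxg
        simp only [List.map_cons, List.takeWhile_cons]
        simp [hs1]

-- ===== VERDICT (by name: the statement is the Claim_ definition above) =====
theorem build_dialogue_spec : Claim_unchanged_build_dialogue := by
  unfold Claim_unchanged_build_dialogue
  intro data groups _hdom _hpre
  unfold Spec_build_dialogue
  intro hnd
  cases hmax : PySem.List.max? (PySem.List.pyRange 0 (groups.length : Int))
      (fun i => ((PySem.List.pyGet? groups i).getD []).length) with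
  | none =>
    unfold build_dialogue build_dialogue_alt
    rw [hmax]
  | some largest =>
    rw [pv_Aeq data groups largest hmax, pv_Beq data groups largest hmax]
    exact pv_top _ (fun hc => hnd ((pv_corner_iff data groups largest).mp hc))

theorem build_dialogue_changed : Claim_changed_build_dialogue := by
  unfold Claim_changed_build_dialogue; decide

theorem build_dialogue_tight : Claim_exact_build_dialogue := by
  unfold Claim_exact_build_dialogue
  intro data groups _hdom hpre hD
  cases hmax : PySem.List.max? (PySem.List.pyRange 0 (groups.length : Int))
      (fun i => ((PySem.List.pyGet? groups i).getD []).length) with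
  | none =>
    exfalso
    rw [PySem.List.max?_eq_none_iff] at hmax
    have h0 : ((groups.length : Int) - 0).toNat = 0 := by
      rw [← PySem.List.length_pyRange_one, hmax]
      rfl
    have h1 : groups.length = 0 := by omega
    exact hpre (List.eq_nil_of_length_eq_zero h1)
  | some largest =>
    obtain ⟨t, hp, htw⟩ := (pv_corner_iff data groups largest).mpr hD
    rw [pv_Aeq data groups largest hmax, pv_Beq data groups largest hmax, hp,
      pv_top_corner t htw]
    intro heq
    have hl := congrArg List.length heq
    simp at hl
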